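-- pv_equiv track=rewrite | github.com/ruipeterpan/failfast | plotting/consecutive_easy_cdf.py | binary_to_consecutive_true_lengths
-- ===== SOURCE A (Python) =====
-- def binary_to_consecutive_true_lengths(binary_list):
--     """
--     Convert a binary list to lengths of consecutive True's.
--     E.g., [True, True, False, True, False, True, True, True] -> [2, 1, 3].
--     """
--     lengths = []
--     count = 0
--     for b in binary_list:
--         if b:
--             count += 1
--         else:
--             if count > 0:
--                 lengths.append(count)
--             count = 0
--     if count > 0:
--         lengths.append(count)
--     return lengths
-- ===== SOURCE B (Python) =====
-- def binary_to_consecutive_true_lengths(binary_list):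
--     """
--     Convert a binary list to lengths of consecutive True's.
--     E.g., [True, True, False, True, False, True, True, True] -> [2, 1, 3].
--     """
--     lengths = []
--     i, n = 0, len(binary_list)
--     while i < n:
--         if binary_list[i]:
--             j = i
--             while j < n and binary_list[j]:
--                 j += 1
--             lengths.append(j - i)
--             i = j
--         else:
--             i += 1
--     return lengths
-- ===== Notes on version B (the rewrite author's own statement) =====
-- stated objective: alternative
-- what changed: Replaces A's single-pass running counter with a two-level run scanner: an outer index loop finds the start of each True run and an inner scan measures the whole run at once, appending its length directly.
import Mathlib
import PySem

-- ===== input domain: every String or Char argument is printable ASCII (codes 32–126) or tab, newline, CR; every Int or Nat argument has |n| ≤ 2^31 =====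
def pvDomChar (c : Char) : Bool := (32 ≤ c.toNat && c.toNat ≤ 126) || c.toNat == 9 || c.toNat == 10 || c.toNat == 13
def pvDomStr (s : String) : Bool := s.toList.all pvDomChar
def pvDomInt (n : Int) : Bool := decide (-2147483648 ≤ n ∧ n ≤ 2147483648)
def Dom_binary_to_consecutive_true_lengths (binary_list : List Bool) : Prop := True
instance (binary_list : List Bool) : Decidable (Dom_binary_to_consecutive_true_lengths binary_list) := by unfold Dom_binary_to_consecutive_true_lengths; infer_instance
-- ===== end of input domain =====

-- B replaces A's running-counter pass with a two-level run scanner (outer loop finds each True run, inner scan measures it); same O(n) cost, different decomposition.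


-- ===== PORT A =====
-- A: one pass with a running counter; a run is flushed when a False is met, and once more after the loop.
def binary_to_consecutive_true_lengths (binary_list : List Bool) : List Int :=
  let st := binary_list.foldl
    (fun (st : List Int × Int) b =>
      if b then (st.1, st.2 + 1)
      else if st.2 > 0 then (st.1 ++ [st.2], 0) else (st.1, 0))
    ([], 0)
  if st.2 > 0 then st.1 ++ [st.2] else st.1

-- ===== PORT B =====
-- B: run scanner — on a True, the inner scan (takeWhile/dropWhile, mirroring Source B's inner `while`) measures the whole run.
def binary_to_consecutive_true_lengths_alt (binary_list : List Bool) : List Int :=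
  match binary_list with
  | [] => []
  | false :: t => binary_to_consecutive_true_lengths_alt t
  | true :: t =>
      (((t.takeWhile id).length : Int) + 1) :: binary_to_consecutive_true_lengths_alt (t.dropWhile id)
termination_by binary_list.length
decreasing_by
  · simp
  · simpa using Nat.lt_succ_of_le (List.length_dropWhile_le id t)

-- ===== PRECONDITION & SPEC =====
def Spec_binary_to_consecutive_true_lengths (binary_list : List Bool) (out : List Int) : Prop := out = binary_to_consecutive_true_lengths_alt binary_list
instance (binary_list : List Bool) (out : List Int) : Decidable (Spec_binary_to_consecutive_true_lengths binary_list out) := by unfold Spec_binary_to_consecutive_true_lengths; infer_instance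

-- ===== CLAIM (what is proved, stated in full; the proofs are below) =====
def Claim_equal_binary_to_consecutive_true_lengths : Prop := ∀ (binary_list : List Bool), Dom_binary_to_consecutive_true_lengths binary_list → Spec_binary_to_consecutive_true_lengths binary_list (binary_to_consecutive_true_lengths binary_list)

-- ===== LEMMAS AND PROOFS =====

-- abbreviations for the proof only
def pvStep (st : List Int × Int) (b : Bool) : List Int × Int :=
  if b then (st.1, st.2 + 1)
  else if st.2 > 0 then (st.1 ++ [st.2], 0) else (st.1, 0)

def pvFin (st : List Int × Int) : List Int := if st.2 > 0 then st.1 ++ [st.2] else st.1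

-- what A's loop produces from a pending positive count
lemma pvFold_pos : ∀ (t : List Bool) (acc : List Int) (c : Int), 0 < c →
    pvFin (t.foldl pvStep (acc, c)) =
      pvFin ((t.dropWhile id).foldl pvStep (acc ++ [c + ((t.takeWhile id).length : Int)], 0)) := by
  intro t
  induction t with
  | nil => intro acc c hc; simp [pvFin, hc]
  | cons b t ih =>
    intro acc c hc
    cases b with
    | true =>
      have h2 := ih acc (c + 1) (by omega)
      calc pvFin ((true :: t).foldl pvStep (acc, c))
          = pvFin (t.foldl pvStep (acc, c + 1)) := by simp [pvStep]
        _ = pvFin ((t.dropWhile id).foldl pvStep (acc ++ [(c+1) + ((t.takeWhile id).length : Int)], 0)) := h2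
        _ = pvFin ((((true :: t)).dropWhile id).foldl pvStep
              (acc ++ [c + (((true :: t).takeWhile id).length : Int)], 0)) := by
              simp [List.takeWhile, List.dropWhile]; ring_nf
    | false =>
      simp [pvStep, hc, List.takeWhile, List.dropWhile]

-- from count 0, A's loop computes B
lemma pvFold_zero : ∀ (t : List Bool) (acc : List Int),
    pvFin (t.foldl pvStep (acc, 0)) = acc ++ binary_to_consecutive_true_lengths_alt t := by
  intro t
  induction t using binary_to_consecutive_true_lengths_alt.induct with
  | case1 => intro acc; simp [pvFin, binary_to_consecutive_true_lengths_alt]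
  | case2 t ih =>
    intro acc
    simpa [pvStep, binary_to_consecutive_true_lengths_alt] using ih acc
  | case3 t ih =>
    intro acc
    have h := pvFold_pos t acc 1 (by omega)
    calc pvFin ((true :: t).foldl pvStep (acc, 0))
        = pvFin (t.foldl pvStep (acc, 1)) := by simp [pvStep]
      _
        = pvFin ((t.dropWhile id).foldl pvStep (acc ++ [1 + ((t.takeWhile id).length : Int)], 0)) := h
      _ = (acc ++ [1 + ((t.takeWhile id).length : Int)]) ++
            binary_to_consecutive_true_lengths_alt (t.dropWhile id) := ih _
      _ = acc ++ binary_to_consecutive_true_lengths_alt (true :: t) := by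
            rw [binary_to_consecutive_true_lengths_alt]
            simp; ring_nf

-- ===== VERDICT (by name: the statement is the Claim_ definition above) =====
theorem binary_to_consecutive_true_lengths_spec : Claim_equal_binary_to_consecutive_true_lengths := by
  intro l _
  show binary_to_consecutive_true_lengths l = binary_to_consecutive_true_lengths_alt l
  have h := pvFold_zero l []
  simpa [binary_to_consecutive_true_lengths, pvStep, pvFin] using h
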